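-- pv_equiv track=rewrite | github.com/pypi-data/pypi-mirror-28 | packages/forgi/forgi-1.1-py2.py3-none-any.whl/forgi/graph/bulge_graph.py | condense_stem_pairs
-- ===== SOURCE A (Python) =====
-- def condense_stem_pairs(stem_pairs):
--     """
--     Given a list of stem pairs, condense them into stem definitions
--
--     I.e. the pairs (0,10),(1,9),(2,8),(3,7) can be condensed into
--     just the ends of the stem: [(0,10),(3,7)]
--
--     :param stem_pairs: A list of tuples containing paired base numbers.
--
--     :returns: A list of tuples of tuples of the form [((s1, e1), (s2, e2))]
--                   where s1 and e1 are the nucleotides at one end of the stem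
--                   and s2 and e2 are the nucleotides at the other.
--     """
--     stem_pairs.sort()
--
--     prev_pair = (-10, -10)
--
--     stems = []
--     start_pair = None
--
--     for pair in stem_pairs:
--         # There's a potential bug here since we don't check the direction
--         # but hopefully it won't bite us in the ass later
--         if abs(pair[0] - prev_pair[0]) != 1 or abs(pair[1] - prev_pair[1]) != 1:
--             if start_pair is not None:
--                 stems += [(start_pair, prev_pair)]
--             start_pair = pair
--
--         prev_pair = pair
--
--     if start_pair is not None:
--         stems += [(start_pair, prev_pair)]
--
--     return stems
-- ===== SOURCE B (Python) =====
-- def condense_stem_pairs(stem_pairs):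
--     """Condense sorted stem base pairs into (start, end) of each maximal run.
--
--     Sorts stem_pairs in place (like the original), then walks it once with
--     two index cursors: for each run start i, advance j while the next pair
--     is adjacent (both coordinates differ by exactly 1), emit
--     (stem_pairs[i], stem_pairs[j]), and continue from j + 1.
--     """
--     stem_pairs.sort()
--     stems = []
--     i, n = 0, len(stem_pairs)
--     while i < n:
--         j = i
--         while (j + 1 < n
--                and abs(stem_pairs[j + 1][0] - stem_pairs[j][0]) == 1
--                and abs(stem_pairs[j + 1][1] - stem_pairs[j][1]) == 1):
--             j += 1
--         stems.append((stem_pairs[i], stem_pairs[j]))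
--         i = j + 1
--     return stems
-- ===== Notes on version B (the rewrite author's own statement) =====
-- stated objective: simpler
-- what changed: Replaces A's single fold with a sentinel prev_pair (-10,-10) and an Optional start_pair flag by a plain two-cursor scan over the sorted list that emits (run start, run end) per maximal adjacent run, which also removes A's sentinel bug.
-- intended difference: On lists whose lexicographically smallest pair has both coordinates in {-11,-9} (coordinate-adjacent to A's sentinel prev_pair (-10,-10)), A never opens the first run and silently drops the entire first stem from its result; B also returns that first stem's (start, end) pair, which is the intended condensation. — e.g. on condense_stem_pairs([(-9, -9)]): A returns [], B returns [((-9, -9), (-9, -9))]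
import Mathlib
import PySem

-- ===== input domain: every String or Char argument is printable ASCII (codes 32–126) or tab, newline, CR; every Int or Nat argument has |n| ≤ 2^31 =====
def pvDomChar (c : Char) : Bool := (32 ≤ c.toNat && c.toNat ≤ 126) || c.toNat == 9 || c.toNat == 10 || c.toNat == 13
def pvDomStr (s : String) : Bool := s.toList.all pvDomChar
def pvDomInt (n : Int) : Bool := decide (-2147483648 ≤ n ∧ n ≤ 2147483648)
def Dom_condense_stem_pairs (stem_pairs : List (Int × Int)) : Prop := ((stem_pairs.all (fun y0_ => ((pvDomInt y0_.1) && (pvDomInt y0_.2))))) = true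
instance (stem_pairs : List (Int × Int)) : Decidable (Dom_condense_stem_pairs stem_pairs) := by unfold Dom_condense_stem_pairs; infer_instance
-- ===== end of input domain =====

-- B replaces A's sentinel-and-flag fold by a two-cursor scan over the sorted list (simpler), which
-- also fixes A's sentinel bug (see D_ below). Both A and B sort the argument list in place in
-- Python; the equivalence proved here is about the return value (the mutation is identical anyway).

-- ===== PORT A =====
-- one loop step of A: state = (prev_pair, stems, start_pair)
def pvStepA (st : (Int × Int) × List ((Int × Int) × (Int × Int)) × Option (Int × Int))
    (pair : Int × Int) : (Int × Int) × List ((Int × Int) × (Int × Int)) × Option (Int × Int) :=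
  if |pair.1 - st.1.1| ≠ 1 ∨ |pair.2 - st.1.2| ≠ 1 then
    match st.2.2 with
    | some s0 => (pair, st.2.1 ++ [(s0, st.1)], some pair)
    | none    => (pair, st.2.1, some pair)
  else
    (pair, st.2.1, st.2.2)

-- A's trailing 'if start_pair is not None: stems += [(start_pair, prev_pair)]'
def pvFinish (st : (Int × Int) × List ((Int × Int) × (Int × Int)) × Option (Int × Int)) :
    List ((Int × Int) × (Int × Int)) :=
  match st.2.2 with
  | some s0 => st.2.1 ++ [(s0, st.1)]
  | none    => st.2.1

def condense_stem_pairs (stem_pairs : List (Int × Int)) : List ((Int × Int) × (Int × Int)) :=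
  -- stem_pairs.sort(): Python sorts tuples lexicographically
  pvFinish ((PySem.List.sorted stem_pairs (fun p => toLex p) false).foldl
    pvStepA ((-10, -10), [], none))

-- ===== PORT B =====
-- B's inner while loop: advance the cursor past the run whose previous element is cur;
-- returns (last element of the run, remainder of the list after the run).
def pvRunEnd (cur : Int × Int) : List (Int × Int) → (Int × Int) × List (Int × Int)
  | [] => (cur, [])
  | p :: rest =>
    if |p.1 - cur.1| = 1 ∧ |p.2 - cur.2| = 1 then pvRunEnd p rest
    else (cur, p :: rest)

-- termination measure for the outer loop (cited by pvCondenseRuns's decreasing_by)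
lemma pvRunEnd_length (cur : Int × Int) (l : List (Int × Int)) :
    (pvRunEnd cur l).2.length ≤ l.length := by
  induction l generalizing cur with
  | nil => simp [pvRunEnd]
  | cons p rest ih =>
    simp only [pvRunEnd]
    split
    · exact (ih p).trans (Nat.le_succ _)
    · simp

-- B's outer while loop: emit (run start, run end) per maximal run, continue after the run.
def pvCondenseRuns : List (Int × Int) → List ((Int × Int) × (Int × Int))
  | [] => []
  | p :: rest =>
    (p, (pvRunEnd p rest).1) :: pvCondenseRuns (pvRunEnd p rest).2
termination_by l => l.length
decreasing_by exact Nat.lt_succ_of_le (pvRunEnd_length p rest)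

def condense_stem_pairs_alt (stem_pairs : List (Int × Int)) : List ((Int × Int) × (Int × Int)) :=
  pvCondenseRuns (PySem.List.sorted stem_pairs (fun p => toLex p) false)

-- ===== PRECONDITION & SPEC =====
-- On lists whose lexicographically smallest pair has both coordinates in {-11, -9} (i.e. is
-- coordinate-adjacent to A's sentinel prev_pair = (-10, -10)), A never opens the first run and
-- silently drops the entire first stem from its result; B also returns that first stem's
-- (start, end) pair, which is the intended condensation (see the witness below).
def D_condense_stem_pairs (stem_pairs : List (Int × Int)) : Prop :=
  ∃ h ∈ stem_pairs, (h.1 = -9 ∨ h.1 = -11) ∧ (h.2 = -9 ∨ h.2 = -11) ∧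
    ∀ q ∈ stem_pairs, toLex h ≤ toLex q

instance (stem_pairs : List (Int × Int)) : Decidable (D_condense_stem_pairs stem_pairs) := by
  unfold D_condense_stem_pairs; infer_instance

def Spec_condense_stem_pairs (stem_pairs : List (Int × Int)) (out : List ((Int × Int) × (Int × Int))) : Prop :=
  ¬ D_condense_stem_pairs stem_pairs → out = condense_stem_pairs_alt stem_pairs
instance (stem_pairs : List (Int × Int)) (out : List ((Int × Int) × (Int × Int))) : Decidable (Spec_condense_stem_pairs stem_pairs out) := by unfold Spec_condense_stem_pairs; infer_instance

def pvDiffWitness_condense_stem_pairs : (List (Int × Int)) := [(-9, -9)]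
def pvDiffWitnessOut_condense_stem_pairs :
    (List ((Int × Int) × (Int × Int))) × (List ((Int × Int) × (Int × Int))) :=
  ([], [((-9, -9), (-9, -9))])

-- ===== CLAIM (what is proved, stated in full; the proofs are below) =====
def Claim_unchanged_condense_stem_pairs : Prop := ∀ (stem_pairs : List (Int × Int)), Dom_condense_stem_pairs stem_pairs → Spec_condense_stem_pairs stem_pairs (condense_stem_pairs stem_pairs)
def Claim_changed_condense_stem_pairs : Prop := Dom_condense_stem_pairs (pvDiffWitness_condense_stem_pairs) ∧ D_condense_stem_pairs (pvDiffWitness_condense_stem_pairs) ∧ condense_stem_pairs (pvDiffWitness_condense_stem_pairs) = pvDiffWitnessOut_condense_stem_pairs.1 ∧ condense_stem_pairs_alt (pvDiffWitness_condense_stem_pairs) = pvDiffWitnessOut_condense_stem_pairs.2 ∧ pvDiffWitnessOut_condense_stem_pairs.1 ≠ pvDiffWitnessOut_condense_stem_pairs.2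
def Claim_exact_condense_stem_pairs : Prop := ∀ (stem_pairs : List (Int × Int)), Dom_condense_stem_pairs stem_pairs → D_condense_stem_pairs stem_pairs → condense_stem_pairs stem_pairs ≠ condense_stem_pairs_alt stem_pairs

-- ===== LEMMAS AND PROOFS =====

-- A's loop, from a state with start_pair = some s0 and prev_pair = cur, finishes the current run
-- and then behaves like B's run scanner.
lemma pvFoldA_some (l : List (Int × Int)) : ∀ (cur s0 : Int × Int)
    (stems : List ((Int × Int) × (Int × Int))),
    pvFinish (l.foldl pvStepA (cur, stems, some s0)) =
      stems ++ (s0, (pvRunEnd cur l).1) :: pvCondenseRuns (pvRunEnd cur l).2 := by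
  induction l with
  | nil => intro cur s0 stems; simp [pvRunEnd, pvCondenseRuns, pvFinish]
  | cons p rest ih =>
    intro cur s0 stems
    by_cases hadj : |p.1 - cur.1| = 1 ∧ |p.2 - cur.2| = 1
    · have hstep : pvStepA (cur, stems, some s0) p = (p, stems, some s0) := by
        simp [pvStepA, hadj.1, hadj.2]
      rw [List.foldl_cons, hstep, ih]
      simp [pvRunEnd, hadj.1, hadj.2]
    · have hstep : pvStepA (cur, stems, some s0) p = (p, stems ++ [(s0, cur)], some p) := by
        simp only [pvStepA]
        rw [if_pos (by tauto)]
      rw [List.foldl_cons, hstep, ih]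
      rw [show pvRunEnd cur (p :: rest) = (cur, p :: rest) from by
        simp only [pvRunEnd]; rw [if_neg hadj]]
      simp [pvCondenseRuns]

-- A's loop, from a state with start_pair = None and prev_pair = cur, silently skips the rest of
-- cur's run and then behaves like B's run scanner on the remainder.
lemma pvFoldA_none (l : List (Int × Int)) : ∀ (cur : Int × Int)
    (stems : List ((Int × Int) × (Int × Int))),
    pvFinish (l.foldl pvStepA (cur, stems, none)) =
      stems ++ pvCondenseRuns (pvRunEnd cur l).2 := by
  induction l with
  | nil => intro cur stems; simp [pvRunEnd, pvCondenseRuns, pvFinish]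
  | cons p rest ih =>
    intro cur stems
    by_cases hadj : |p.1 - cur.1| = 1 ∧ |p.2 - cur.2| = 1
    · have hstep : pvStepA (cur, stems, none) p = (p, stems, none) := by
        simp [pvStepA, hadj.1, hadj.2]
      rw [List.foldl_cons, hstep, ih]
      simp [pvRunEnd, hadj.1, hadj.2]
    · have hstep : pvStepA (cur, stems, none) p = (p, stems, some p) := by
        simp only [pvStepA]
        rw [if_pos (by tauto)]
      rw [List.foldl_cons, hstep, pvFoldA_some]
      rw [show pvRunEnd cur (p :: rest) = (cur, p :: rest) from by
        simp only [pvRunEnd]; rw [if_neg hadj]]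
      simp [pvCondenseRuns]

-- the head of the sorted list is the lexicographic minimum, so D_ is exactly a condition on it
lemma pvD_iff_head (sp : List (Int × Int)) (h : Int × Int) (t : List (Int × Int))
    (hs : PySem.List.sorted sp (fun p => toLex p) false = h :: t) :
    D_condense_stem_pairs sp ↔ ((h.1 = -9 ∨ h.1 = -11) ∧ (h.2 = -9 ∨ h.2 = -11)) := by
  have hmem : h ∈ sp := by
    rw [← PySem.List.mem_sorted (key := fun p => toLex p) (rev := false), hs]
    exact List.mem_cons_self ..
  have hmin : ∀ q ∈ sp, toLex h ≤ toLex q :=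
    PySem.List.key_head_sorted_le _ _ hs
  constructor
  · rintro ⟨h0, hm0, hc1, hc2, hmin0⟩
    have h1 : toLex h ≤ toLex h0 := hmin h0 hm0
    have h2 : toLex h0 ≤ toLex h := hmin0 h hmem
    have : h0 = h := toLex.injective (le_antisymm h2 h1)
    subst this
    exact ⟨hc1, hc2⟩
  · rintro ⟨hc1, hc2⟩
    exact ⟨h, hmem, hc1, hc2, hmin⟩

lemma pvAbsSentinel (x : Int) : |x - (-10)| = 1 ↔ (x = -9 ∨ x = -11) := by
  rw [abs_eq (by norm_num : (0:Int) ≤ 1)]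
  omega

lemma pvAbsSentinel' (x : Int) : |x + 10| = 1 ↔ (x = -9 ∨ x = -11) := by
  rw [abs_eq (by norm_num : (0:Int) ≤ 1)]
  omega

-- ===== VERDICT (by name: the statement is the Claim_ definition above) =====
theorem condense_stem_pairs_spec : Claim_unchanged_condense_stem_pairs := by
  intro sp _ hnd
  show condense_stem_pairs sp = condense_stem_pairs_alt sp
  unfold condense_stem_pairs condense_stem_pairs_alt
  cases hs : PySem.List.sorted sp (fun p => toLex p) false with
  | nil => simp [pvCondenseRuns, pvFinish]
  | cons h t =>
    have hc : ¬((h.1 = -9 ∨ h.1 = -11) ∧ (h.2 = -9 ∨ h.2 = -11)) :=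
      fun hcc => hnd ((pvD_iff_head sp h t hs).mpr hcc)
    have hbreak : |h.1 - (-10 : Int)| ≠ 1 ∨ |h.2 - (-10 : Int)| ≠ 1 := by
      by_contra hcon
      simp only [not_or, not_not] at hcon
      exact hc ⟨(pvAbsSentinel h.1).mp hcon.1, (pvAbsSentinel h.2).mp hcon.2⟩
    have hstep : pvStepA ((-10, -10), [], none) h = (h, [], some h) := by
      simp only [pvStepA]
      rw [if_pos hbreak]
    rw [List.foldl_cons, hstep, pvFoldA_some]
    simp [pvCondenseRuns]

theorem condense_stem_pairs_changed : Claim_changed_condense_stem_pairs := by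
  unfold Claim_changed_condense_stem_pairs
  refine ⟨by decide, by decide, by decide, ?_, by decide⟩
  have hsort : PySem.List.sorted pvDiffWitness_condense_stem_pairs (fun p => toLex p) false
      = [(-9, -9)] := by decide
  unfold condense_stem_pairs_alt
  rw [hsort]
  simp [pvCondenseRuns, pvRunEnd, pvDiffWitnessOut_condense_stem_pairs]

theorem condense_stem_pairs_tight : Claim_exact_condense_stem_pairs := by
  intro sp _ hd heq
  cases hs : PySem.List.sorted sp (fun p => toLex p) false with
  | nil =>
    obtain ⟨h0, hm0, -⟩ := hd
    have : sp = [] := by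
      have := PySem.List.sorted_eq_nil_iff (xs := sp) (key := fun p => toLex p) (rev := false)
      exact this.mp hs
    simp [this] at hm0
  | cons h t =>
    have hcc := (pvD_iff_head sp h t hs).mp hd
    have hadj : |h.1 + (10 : Int)| = 1 ∧ |h.2 + (10 : Int)| = 1 :=
      ⟨(pvAbsSentinel' h.1).mpr hcc.1, (pvAbsSentinel' h.2).mpr hcc.2⟩
    have hstep : pvStepA ((-10, -10), [], none) h = (h, [], none) := by
      simp [pvStepA, hadj.1, hadj.2]
    have hA : condense_stem_pairs sp = pvCondenseRuns (pvRunEnd h t).2 := by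
      unfold condense_stem_pairs
      rw [hs, List.foldl_cons, hstep, pvFoldA_none]
      simp
    have hB : condense_stem_pairs_alt sp =
        (h, (pvRunEnd h t).1) :: pvCondenseRuns (pvRunEnd h t).2 := by
      unfold condense_stem_pairs_alt
      rw [hs]
      simp [pvCondenseRuns]
    rw [hA, hB] at heq
    exact absurd (congrArg List.length heq) (by simp)
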